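-- pv_equiv track=rewrite | github.com/marielachirinosr/First-Python-Steps | convert_phone_number_digits_to_words.py | convert_phone_digits
-- ===== SOURCE A (Python) =====
-- def convert_phone_digits(phone_number):
--
--     digits_mapping = {
--         "1": "One",
--         "2": "Two",
--         "3": "Three",
--         "4": "Four",
--         "5": "Five",
--         "6": "Six",
--         "7": "Seven",
--         "8": "Eight",
--         "9": "Nine",
--         "0": "Zero"
--     }
--
--     output = ""
--     for char in phone_number:
--         if char.isdigit():  # Check if character is a digit
--             output += digits_mapping.get(char, "?") + " "  # Use '?' for unknown digits
--         else:
--             return "Invalid input: Please enter a phone number with only digits."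
--
--     return output.rstrip()  # Remove trailing whitespace
-- ===== SOURCE B (Python) =====
-- WORDS = ["Zero", "One", "Two", "Three", "Four", "Five",
--          "Six", "Seven", "Eight", "Nine"]
--
--
-- def convert_phone_digits(phone_number):
--     # Recursive decomposition: translate the tail first, then prepend the head's
--     # word, indexing a word table by ord(c) - ord('0'); None signals a bad char.
--     def go(chars):
--         if not chars:
--             return ""
--         c = chars[0]
--         if not ('0' <= c <= '9'):
--             return None
--         rest = go(chars[1:])
--         if rest is None:
--             return None
--         w = WORDS[ord(c) - 48]
--         return w if rest == "" else w + " " + rest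
--
--     r = go(phone_number)
--     if r is None:
--         return "Invalid input: Please enter a phone number with only digits."
--     return r
-- ===== Notes on version B (the rewrite author's own statement) =====
-- stated objective: alternative
-- what changed: A's imperative early-exit loop with a dict lookup, a string accumulator appending space-terminated chunks and a final rstrip is replaced by a recursive translator that converts the tail first, then prepends the head's word looked up by ord(c)-48 in a word table, with None propagating a non-digit; no dict, no accumulator, no rstrip.
import Mathlib
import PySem

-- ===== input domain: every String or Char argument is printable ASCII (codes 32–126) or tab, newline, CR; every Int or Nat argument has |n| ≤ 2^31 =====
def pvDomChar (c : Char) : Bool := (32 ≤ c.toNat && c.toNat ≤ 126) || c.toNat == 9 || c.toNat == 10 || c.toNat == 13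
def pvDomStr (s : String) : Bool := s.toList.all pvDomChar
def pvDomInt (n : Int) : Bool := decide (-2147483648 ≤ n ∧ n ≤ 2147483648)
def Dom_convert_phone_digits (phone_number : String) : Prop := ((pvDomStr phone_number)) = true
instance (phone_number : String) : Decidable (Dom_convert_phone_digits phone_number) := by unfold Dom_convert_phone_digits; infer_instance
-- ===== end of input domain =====

-- B replaces A's early-exit accumulate-then-rstrip dict loop by a recursive translator: translate the tail, then prepend the head's word found by ord(c)-48 in a word table (alternative decomposition, no dict, no rstrip).

-- ===== PORT A =====
def pvDigitsMap : PySem.Dict Char String := PySem.Dict.ofList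
  [('1', "One"), ('2', "Two"), ('3', "Three"), ('4', "Four"), ('5', "Five"),
   ('6', "Six"), ('7', "Seven"), ('8', "Eight"), ('9', "Nine"), ('0', "Zero")]

def pvInvalidMsg : String := "Invalid input: Please enter a phone number with only digits."

-- A's loop: accumulate "word " per digit char, early-return on a non-digit, rstrip at the end
def pvLoopA (out : List Char) : List Char → String
  | [] => String.ofList (PySem.Chars.rstrip out)
  | c :: rest =>
      if PySem.Chars.isdigit c then
        pvLoopA (out ++ (pvDigitsMap.getD c "?").toList ++ [' ']) rest
      else pvInvalidMsg

def convert_phone_digits (phone_number : String) : String :=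
  pvLoopA [] phone_number.toList

-- ===== PORT B =====
def pvWords : List String :=
  ["Zero", "One", "Two", "Three", "Four", "Five", "Six", "Seven", "Eight", "Nine"]

-- Source B's `go`: translate the tail first, then prepend the head's word (WORDS[ord(c)-48]);
-- none = Python's None (a non-digit was seen). The guarded index is always in range, so
-- the `.getD ""` default of pyGet? is unreachable (Python would raise IndexError there).
def pvGoB : List Char → Option String
  | [] => some ""
  | c :: rest =>
      if '0' ≤ c ∧ c ≤ '9' then
        match pvGoB rest with
        | none => none
        | some r =>
            let w := (PySem.List.pyGet? pvWords ((c.toNat : Int) - 48)).getD ""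
            some (if r = "" then w else w ++ " " ++ r)
      else none

def convert_phone_digits_alt (phone_number : String) : String :=
  match pvGoB phone_number.toList with
  | some r => r
  | none => pvInvalidMsg

-- ===== PRECONDITION & SPEC =====
def Spec_convert_phone_digits (phone_number : String) (out : String) : Prop := out = convert_phone_digits_alt phone_number
instance (phone_number : String) (out : String) : Decidable (Spec_convert_phone_digits phone_number out) := by unfold Spec_convert_phone_digits; infer_instance

-- ===== CLAIM (what is proved, stated in full; the proofs are below) =====
def Claim_equal_convert_phone_digits : Prop := ∀ (phone_number : String), Dom_convert_phone_digits phone_number → Spec_convert_phone_digits phone_number (convert_phone_digits phone_number)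

-- ===== LEMMAS AND PROOFS =====

theorem guard_eq_isdigit (c : Char) :
    (decide ('0' ≤ c ∧ c ≤ '9')) = PySem.Chars.isdigit c := by
  simp [PySem.Chars.isdigit]

theorem digit_cases (c : Char) (h : PySem.Chars.isdigit c = true) :
    c = '0' ∨ c = '1' ∨ c = '2' ∨ c = '3' ∨ c = '4' ∨ c = '5' ∨ c = '6' ∨ c = '7' ∨ c = '8' ∨ c = '9' := by
  simp [PySem.Chars.isdigit, Char.le_def] at h
  obtain ⟨h1, h2⟩ := h
  have h1' : 48 ≤ c.toNat := UInt32.le_iff_toNat_le.mp h1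
  have h2' : c.toNat ≤ 57 := UInt32.le_iff_toNat_le.mp h2
  have hc : Char.ofNat c.toNat = c := Char.ofNat_toNat c
  have hn : c.toNat = 48 ∨ c.toNat = 49 ∨ c.toNat = 50 ∨ c.toNat = 51 ∨ c.toNat = 52 ∨ c.toNat = 53 ∨ c.toNat = 54 ∨ c.toNat = 55 ∨ c.toNat = 56 ∨ c.toNat = 57 := by omega
  rcases hn with hn|hn|hn|hn|hn|hn|hn|hn|hn|hn <;> rw [hn] at hc <;> simp [← hc]

theorem word_eq (c : Char) (h : PySem.Chars.isdigit c = true) :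
    (PySem.List.pyGet? pvWords ((c.toNat : Int) - 48)).getD "" = pvDigitsMap.getD c "?" := by
  rcases digit_cases c h with h|h|h|h|h|h|h|h|h|h <;> subst h <;> decide

theorem word_ne_nil (c : Char) (h : PySem.Chars.isdigit c = true) :
    (pvDigitsMap.getD c "?").toList ≠ [] := by
  rcases digit_cases c h with h|h|h|h|h|h|h|h|h|h <;> subst h <;> decide

theorem rstrip_word_space (c : Char) (h : PySem.Chars.isdigit c = true) :
    PySem.Chars.rstrip ((pvDigitsMap.getD c "?").toList ++ [' ']) = (pvDigitsMap.getD c "?").toList := by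
  rcases digit_cases c h with h|h|h|h|h|h|h|h|h|h <;> subst h <;> decide

theorem rstrip_append_of_ne_nil (a b : List Char) (h : PySem.Chars.rstrip b ≠ []) :
    PySem.Chars.rstrip (a ++ b) = a ++ PySem.Chars.rstrip b := by
  unfold PySem.Chars.rstrip at *
  rw [List.reverse_append, List.dropWhile_append]
  split_ifs with he
  · rw [List.isEmpty_iff] at he
    exact absurd (by rw [he]; rfl) h
  · rw [List.reverse_append, List.reverse_reverse]

theorem join_ne_nil (c : Char) (ws : List (List Char)) (h : PySem.Chars.isdigit c = true) :
    PySem.Chars.join [' '] ((pvDigitsMap.getD c "?").toList :: ws) ≠ [] := by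
  cases ws with
  | nil => simpa [PySem.Chars.join_singleton] using word_ne_nil c h
  | cons w ws =>
      rw [PySem.Chars.join_cons_cons]
      simp [word_ne_nil c h]

theorem rstrip_flatten_eq_join (cs : List Char) (h : ∀ c ∈ cs, PySem.Chars.isdigit c = true) :
    PySem.Chars.rstrip ((cs.map (fun c => (pvDigitsMap.getD c "?").toList ++ [' '])).flatten)
      = PySem.Chars.join [' '] (cs.map (fun c => (pvDigitsMap.getD c "?").toList)) := by
  induction cs with
  | nil => decide
  | cons c rest ih =>
      have hc : PySem.Chars.isdigit c = true := h c (by simp)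
      have hrest : ∀ x ∈ rest, PySem.Chars.isdigit x = true := fun x hx => h x (by simp [hx])
      cases rest with
      | nil =>
          simp only [List.map_cons, List.map_nil, List.flatten_cons, List.flatten_nil,
            List.append_nil, PySem.Chars.join_singleton]
          exact rstrip_word_space c hc
      | cons d rest' =>
          have hd : PySem.Chars.isdigit d = true := hrest d (by simp)
          have hne : PySem.Chars.rstrip (((d :: rest').map (fun c => (pvDigitsMap.getD c "?").toList ++ [' '])).flatten) ≠ [] := by
            rw [ih hrest]
            simpa using join_ne_nil d ((rest').map (fun c => (pvDigitsMap.getD c "?").toList)) hd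
          calc PySem.Chars.rstrip (((c :: d :: rest').map (fun c => (pvDigitsMap.getD c "?").toList ++ [' '])).flatten)
              = PySem.Chars.rstrip (((pvDigitsMap.getD c "?").toList ++ [' ']) ++ ((d :: rest').map (fun c => (pvDigitsMap.getD c "?").toList ++ [' '])).flatten) := by
                simp
            _ = ((pvDigitsMap.getD c "?").toList ++ [' ']) ++ PySem.Chars.rstrip (((d :: rest').map (fun c => (pvDigitsMap.getD c "?").toList ++ [' '])).flatten) :=
                rstrip_append_of_ne_nil _ _ hne
            _ = ((pvDigitsMap.getD c "?").toList ++ [' ']) ++ PySem.Chars.join [' '] (((d :: rest')).map (fun c => (pvDigitsMap.getD c "?").toList)) := by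
                rw [ih hrest]
            _ = PySem.Chars.join [' '] (((c :: d :: rest')).map (fun c => (pvDigitsMap.getD c "?").toList)) := by
                simp [PySem.Chars.join_cons_cons]

theorem loopA_all (cs : List Char) (out : List Char) (h : ∀ c ∈ cs, PySem.Chars.isdigit c = true) :
    pvLoopA out cs = String.ofList (PySem.Chars.rstrip (out ++ (cs.map (fun c => (pvDigitsMap.getD c "?").toList ++ [' '])).flatten)) := by
  induction cs generalizing out with
  | nil => simp [pvLoopA]
  | cons c rest ih =>
      have hc : PySem.Chars.isdigit c = true := h c (by simp)
      rw [pvLoopA, if_pos hc, ih _ (fun x hx => h x (by simp [hx]))]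
      simp

theorem loopA_bad (cs : List Char) (out : List Char) (h : ¬ ∀ c ∈ cs, PySem.Chars.isdigit c = true) :
    pvLoopA out cs = pvInvalidMsg := by
  induction cs generalizing out with
  | nil => exact absurd (by simp) h
  | cons c rest ih =>
      by_cases hc : PySem.Chars.isdigit c = true
      · rw [pvLoopA, if_pos hc]
        exact ih _ (fun hall => h (by simpa [hc] using hall))
      · rw [pvLoopA, if_neg hc]

theorem goB_all (cs : List Char) (h : ∀ c ∈ cs, PySem.Chars.isdigit c = true) :
    pvGoB cs = some (String.ofList (PySem.Chars.join [' '] (cs.map (fun c => (pvDigitsMap.getD c "?").toList)))) := by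
  induction cs with
  | nil => decide
  | cons c rest ih =>
      have hc : PySem.Chars.isdigit c = true := h c (by simp)
      have hguard : '0' ≤ c ∧ c ≤ '9' := by
        have := guard_eq_isdigit c
        rw [hc] at this
        exact of_decide_eq_true this
      rw [pvGoB, if_pos hguard, ih (fun x hx => h x (by simp [hx]))]
      simp only [word_eq c hc]
      cases rest with
      | nil =>
          simp only [List.map_nil, List.map_cons]
          rw [if_pos (by decide)]
          rw [PySem.Chars.join_singleton, String.ofList_toList]
      | cons d rest' =>
          have hd : PySem.Chars.isdigit d = true := h d (by simp)
          have hne : PySem.Chars.join [' '] (((d :: rest')).map (fun c => (pvDigitsMap.getD c "?").toList)) ≠ [] := by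
            simpa using join_ne_nil d (rest'.map (fun c => (pvDigitsMap.getD c "?").toList)) hd
          rw [if_neg (by
            intro hemp
            apply hne
            have := congrArg String.toList hemp
            simpa using this)]
          congr 1
          apply String.toList_injective
          simp [PySem.Chars.join_cons_cons]

theorem goB_bad (cs : List Char) (h : ¬ ∀ c ∈ cs, PySem.Chars.isdigit c = true) :
    pvGoB cs = none := by
  induction cs with
  | nil => exact absurd (by simp) h
  | cons c rest ih =>
      by_cases hc : PySem.Chars.isdigit c = true
      · have hguard : '0' ≤ c ∧ c ≤ '9' := by
          have := guard_eq_isdigit c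
          rw [hc] at this
          exact of_decide_eq_true this
        rw [pvGoB, if_pos hguard, ih (fun hall => h (by simpa [hc] using hall))]
      · have hguard : ¬ ('0' ≤ c ∧ c ≤ '9') := by
          intro hg
          exact hc (by rw [← guard_eq_isdigit]; exact decide_eq_true hg)
        rw [pvGoB, if_neg hguard]

-- ===== VERDICT (by name: the statement is the Claim_ definition above) =====
theorem convert_phone_digits_spec : Claim_equal_convert_phone_digits := by
  intro s _
  unfold Spec_convert_phone_digits convert_phone_digits convert_phone_digits_alt
  by_cases hall : ∀ c ∈ s.toList, PySem.Chars.isdigit c = true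
  · rw [loopA_all _ _ hall, goB_all _ hall]
    rw [List.nil_append, rstrip_flatten_eq_join _ hall]
  · rw [loopA_bad _ _ hall, goB_bad _ hall]
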